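-- pv_equiv track=rewrite | github.com/baptistecottier/advents-of-code | events/2023/14/14.py | tilt_n
-- ===== SOURCE A (Python) =====
-- def tilt_n(rnd, sqr, h):
--     tlt = set()
--     for x, y in rnd:
--         while (x, y) not in sqr and y <= h : y += 1
--         y -= 1
--         while (x, y) in tlt : y -= 1
--         tlt.add((x, y))
--     return tlt
-- ===== SOURCE B (Python) =====
-- def tilt_n(rnd, sqr, h):
--     # Closed-form slide: one pass over sqr per rock instead of a cell-by-cell
--     # upward scan; settled rocks kept per column.
--     cols = {}
--     out = []
--     for x, y in rnd:
--         stop = max(y, h + 1)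
--         for sx, sy in sqr:
--             if sx == x and y <= sy < stop:
--                 stop = sy
--         col = cols.setdefault(x, set())
--         f = stop - 1
--         while f in col:
--             f -= 1
--         col.add(f)
--         out.append((x, f))
--     return set(out)
-- ===== Notes on version B (the rewrite author's own statement) =====
-- stated objective: faster
-- what changed: B replaces A's cell-by-cell upward scan (a while loop doing a full membership scan of sqr at every row) with a single pass over sqr computing the stopping row in closed form, and keeps settled rocks in per-column sets instead of one global set of pairs.
import Mathlib
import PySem

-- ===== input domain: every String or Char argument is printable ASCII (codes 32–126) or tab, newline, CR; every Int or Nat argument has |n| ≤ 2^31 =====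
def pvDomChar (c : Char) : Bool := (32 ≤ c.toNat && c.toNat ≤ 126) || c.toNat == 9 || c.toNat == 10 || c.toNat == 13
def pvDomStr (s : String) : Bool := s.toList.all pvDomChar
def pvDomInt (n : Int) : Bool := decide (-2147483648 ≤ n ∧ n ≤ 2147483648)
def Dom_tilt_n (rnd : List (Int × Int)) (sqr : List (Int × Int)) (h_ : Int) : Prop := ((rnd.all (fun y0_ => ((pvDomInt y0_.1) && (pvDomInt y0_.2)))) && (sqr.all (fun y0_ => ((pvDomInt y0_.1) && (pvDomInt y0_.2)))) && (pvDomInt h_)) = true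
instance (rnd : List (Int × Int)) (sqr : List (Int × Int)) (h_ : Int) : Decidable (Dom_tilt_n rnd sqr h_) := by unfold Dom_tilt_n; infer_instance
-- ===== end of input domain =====

-- B replaces A's cell-by-cell upward scan with a single pass over `sqr` computing the
-- stopping row in closed form, and keeps settled rocks per column; same return value.

-- ===== PORT A =====

-- termination helper for the downward scans: strictly fewer occupied cells at or below y-1
theorem pvFilterLe {α : Type} (l : List α) (P Q : α → Bool)
    (himp : ∀ a, Q a = true → P a = true) :
    (l.filter Q).length ≤ (l.filter P).length := by
  induction l with
  | nil => simp
  | cons b t ih =>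
    simp only [List.filter_cons]
    cases hQ : Q b
    · cases hP : P b
      · exact ih
      · exact Nat.le_succ_of_le ih
    · rw [himp b hQ]
      simpa using ih

theorem pvFilterLt {α : Type} (l : List α) (P Q : α → Bool)
    (himp : ∀ a, Q a = true → P a = true) (a : α) (ha : a ∈ l)
    (hPa : P a = true) (hQa : Q a = false) :
    (l.filter Q).length < (l.filter P).length := by
  induction l with
  | nil => cases ha
  | cons b t ih =>
    simp only [List.filter_cons]
    rcases List.mem_cons.mp ha with rfl | hmem
    · rw [hPa, hQa]
      exact Nat.lt_succ_of_le (pvFilterLe t P Q himp)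
    · cases hQ : Q b
      · cases hP : P b
        · exact ih hmem
        · exact Nat.lt_succ_of_lt (ih hmem)
      · rw [himp b hQ]
        simpa using ih hmem

-- 'while (x, y) not in sqr and y <= h: y += 1'
def slideUpA (sqr : List (Int × Int)) (h_ x y : Int) : Int :=
  if (x, y) ∉ sqr ∧ y ≤ h_ then slideUpA sqr h_ x (y + 1) else y
termination_by (h_ + 1 - y).toNat
decreasing_by omega

-- 'while (x, y) in tlt: y -= 1'
def dropA (tlt : List (Int × Int)) (x y : Int) : Int :=
  if (x, y) ∈ tlt then dropA tlt x (y - 1) else y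
termination_by (tlt.filter (fun p => decide (p.1 = x ∧ p.2 ≤ y))).length
decreasing_by
  exact pvFilterLt tlt _ _
    (by intro a h; simp_all; omega) (x, y) (by assumption) (by simp) (by simp)

-- one iteration of A's 'for x, y in rnd' body
def stepA (sqr : List (Int × Int)) (h_ : Int) (tlt : PySem.Set (Int × Int)) (r : Int × Int) :
    PySem.Set (Int × Int) :=
  let y1 := slideUpA sqr h_ r.1 r.2 - 1
  PySem.Set.add tlt (r.1, dropA tlt r.1 y1)

def tilt_n (rnd : List (Int × Int)) (sqr : List (Int × Int)) (h_ : Int) : List (Int × Int) :=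
  rnd.foldl (stepA sqr h_) PySem.Set.empty

-- ===== PORT B =====

-- 'stop = max(y, h + 1); for sx, sy in sqr: if sx == x and y <= sy < stop: stop = sy'
def stopB (sqr : List (Int × Int)) (h_ x y : Int) : Int :=
  sqr.foldl (fun stop s => if s.1 = x ∧ y ≤ s.2 ∧ s.2 < stop then s.2 else stop) (max y (h_ + 1))

-- 'while f in col: f -= 1'  (per-column set of settled rows)
def dropB (col : List Int) (f : Int) : Int :=
  if f ∈ col then dropB col (f - 1) else f
termination_by (col.filter (fun v => decide (v ≤ f))).length
decreasing_by
  exact pvFilterLt col _ _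
    (by intro a h; simp_all; omega) f (by assumption) (by simp) (by simp)

-- one iteration of B's loop body: (columns dict, output list)
def stepB (sqr : List (Int × Int)) (h_ : Int)
    (st : PySem.Dict Int (PySem.Set Int) × List (Int × Int)) (r : Int × Int) :
    PySem.Dict Int (PySem.Set Int) × List (Int × Int) :=
  let stop := stopB sqr h_ r.1 r.2
  let cols := st.1.setdefault r.1 PySem.Set.empty
  let col := cols.getD r.1 PySem.Set.empty
  let f := dropB col (stop - 1)
  (cols.insert r.1 (PySem.Set.add col f), st.2 ++ [(r.1, f)])

def tilt_n_alt (rnd : List (Int × Int)) (sqr : List (Int × Int)) (h_ : Int) : List (Int × Int) :=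
  let st := rnd.foldl (stepB sqr h_) (PySem.Dict.empty, [])
  PySem.Set.ofList st.2

-- ===== PRECONDITION & SPEC =====
def Spec_tilt_n (rnd : List (Int × Int)) (sqr : List (Int × Int)) (h_ : Int) (out : List (Int × Int)) : Prop := out = tilt_n_alt rnd sqr h_
instance (rnd : List (Int × Int)) (sqr : List (Int × Int)) (h_ : Int) (out : List (Int × Int)) : Decidable (Spec_tilt_n rnd sqr h_ out) := by unfold Spec_tilt_n; infer_instance

-- ===== CLAIM (what is proved, stated in full; the proofs are below) =====
def Claim_equal_tilt_n : Prop := ∀ (rnd : List (Int × Int)) (sqr : List (Int × Int)) (h_ : Int), Dom_tilt_n rnd sqr h_ → Spec_tilt_n rnd sqr h_ (tilt_n rnd sqr h_)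

-- ===== LEMMAS AND PROOFS =====

-- stopB's fold: characterisation lemmas (acc generalised)
theorem stopB_fold_ge (sqr : List (Int × Int)) (x y acc : Int) (h : y ≤ acc) :
    y ≤ sqr.foldl (fun stop s => if s.1 = x ∧ y ≤ s.2 ∧ s.2 < stop then s.2 else stop) acc := by
  induction sqr generalizing acc with
  | nil => exact h
  | cons s t ih =>
    simp only [List.foldl_cons]
    split
    · exact ih _ (by omega)
    · exact ih _ h

theorem stopB_fold_le_acc (sqr : List (Int × Int)) (x y acc : Int) :
    sqr.foldl (fun stop s => if s.1 = x ∧ y ≤ s.2 ∧ s.2 < stop then s.2 else stop) acc ≤ acc := by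
  induction sqr generalizing acc with
  | nil => simp
  | cons s t ih =>
    simp only [List.foldl_cons]
    split
    · exact le_trans (ih _) (by omega)
    · exact ih _

theorem stopB_fold_min (sqr : List (Int × Int)) (x y acc : Int) (s : Int × Int)
    (hs : s ∈ sqr) (hx : s.1 = x) (hy : y ≤ s.2) :
    sqr.foldl (fun stop s => if s.1 = x ∧ y ≤ s.2 ∧ s.2 < stop then s.2 else stop) acc ≤ s.2 := by
  induction sqr generalizing acc with
  | nil => cases hs
  | cons b t ih =>
    simp only [List.foldl_cons]
    rcases List.mem_cons.mp hs with rfl | hmem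
    · by_cases hlt : s.2 < acc
      · rw [if_pos ⟨hx, hy, hlt⟩]
        exact stopB_fold_le_acc t x y s.2
      · split
        · exact stopB_fold_le_acc t x y s.2
        · exact le_trans (stopB_fold_le_acc t x y acc) (by omega)
    · split
      · exact ih _ hmem
      · exact ih _ hmem

-- slideUpA equals the closed-form stop of B
theorem slideUpA_eq_stopB (sqr : List (Int × Int)) (h_ x y : Int) :
    slideUpA sqr h_ x y = stopB sqr h_ x y := by
  fun_induction slideUpA sqr h_ x y with
  | case1 y hcond ih =>
    rw [ih]
    obtain ⟨hnot, hle⟩ := hcond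
    unfold stopB
    have hmax : max (y + 1) (h_ + 1) = max y (h_ + 1) := by omega
    rw [hmax]
    refine PySem.List.foldl_congr_mem sqr _ _ _ ?_
    intro acc s hs
    by_cases hsx : s.1 = x
    · by_cases hsy : s.2 = y
      · exfalso
        apply hnot
        have hsxy : s = (x, y) := by cases s; simp_all
        rwa [hsxy] at hs
      · have hiff : (y + 1 ≤ s.2 ∧ s.2 < acc) ↔ (y ≤ s.2 ∧ s.2 < acc) := by omega
        by_cases hc : y + 1 ≤ s.2 ∧ s.2 < acc
        · rw [if_pos ⟨hsx, hc⟩, if_pos ⟨hsx, hiff.mp hc⟩]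
        · rw [if_neg (by tauto), if_neg (by rw [hiff] at hc; tauto)]
    · rw [if_neg (by tauto), if_neg (by tauto)]
  | case2 y hcond =>
    push Not at hcond
    by_cases hmem : (x, y) ∈ sqr
    · have h1 := stopB_fold_ge sqr x y (max y (h_ + 1)) (by omega)
      have h2 := stopB_fold_min sqr x y (max y (h_ + 1)) (x, y) hmem rfl (le_refl y)
      unfold stopB; omega
    · have hy : h_ < y := hcond hmem
      have h1 := stopB_fold_ge sqr x y (max y (h_ + 1)) (by omega)
      have h2 := stopB_fold_le_acc sqr x y (max y (h_ + 1))
      unfold stopB; omega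

-- the two downward scans agree when the column views agree
theorem dropA_eq_dropB (tlt : List (Int × Int)) (col : List Int) (x : Int)
    (hmem : ∀ f : Int, (x, f) ∈ tlt ↔ f ∈ col) (y : Int) :
    dropA tlt x y = dropB col y := by
  fun_induction dropA tlt x y with
  | case1 y hin ih =>
    rw [ih]
    conv_rhs => rw [dropB]
    rw [if_pos ((hmem y).mp hin)]
  | case2 y hout =>
    rw [dropB, if_neg (fun hc => hout ((hmem y).mpr hc))]

theorem dropA_not_mem (tlt : List (Int × Int)) (x y : Int) : (x, dropA tlt x y) ∉ tlt := by
  fun_induction dropA tlt x y with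
  | case1 y hin ih => exact ih
  | case2 y hout => exact hout

-- main loop invariant: A's set is B's output list, with the per-column view in B's dict
theorem tilt_loop_inv (sqr : List (Int × Int)) (h_ : Int) (rnd : List (Int × Int))
    (tlt : PySem.Set (Int × Int)) (cols : PySem.Dict Int (PySem.Set Int))
    (out : List (Int × Int))
    (hout : out = tlt) (hnd : tlt.Nodup)
    (hcol : ∀ (x f : Int), (x, f) ∈ tlt ↔ f ∈ cols.getD x PySem.Set.empty) :
    rnd.foldl (stepA sqr h_) tlt = (rnd.foldl (stepB sqr h_) (cols, out)).2
    ∧ (rnd.foldl (stepB sqr h_) (cols, out)).2.Nodup := by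
  induction rnd generalizing tlt cols out with
  | nil => simp only [List.foldl_nil]; exact ⟨hout.symm, by rw [hout]; exact hnd⟩
  | cons r t ih =>
    simp only [List.foldl_cons]
    -- the column view after setdefault is unchanged
    have hsd : ∀ (x : Int),
        (cols.setdefault r.1 PySem.Set.empty).getD x PySem.Set.empty
          = cols.getD x PySem.Set.empty := by
      intro x
      by_cases hx : x = r.1
      · subst hx; exact PySem.Dict.getD_setdefault_self cols _ _ _
      · rw [PySem.Dict.getD_eq_get?_getD,
            PySem.Dict.get?_setdefault_of_ne cols PySem.Set.empty hx,
            ← PySem.Dict.getD_eq_get?_getD]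
    set colsd := cols.setdefault r.1 PySem.Set.empty with hcolsd
    set col := colsd.getD r.1 PySem.Set.empty with hcoldef
    have hcoleq : col = cols.getD r.1 PySem.Set.empty := hsd r.1
    have hview : ∀ f : Int, (r.1, f) ∈ tlt ↔ f ∈ col := by
      intro f; rw [hcoleq]; exact hcol r.1 f
    set f := dropB col (stopB sqr h_ r.1 r.2 - 1) with hfdef
    have hdrop : dropA tlt r.1 (slideUpA sqr h_ r.1 r.2 - 1) = f := by
      rw [slideUpA_eq_stopB]; exact dropA_eq_dropB tlt col r.1 hview _
    have hfresh : (r.1, f) ∉ tlt := by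
      rw [← hdrop]; exact dropA_not_mem tlt r.1 _
    have hstepA : stepA sqr h_ tlt r = tlt ++ [(r.1, f)] := by
      show PySem.Set.add tlt (r.1, dropA tlt r.1 (slideUpA sqr h_ r.1 r.2 - 1))
        = tlt ++ [(r.1, f)]
      rw [hdrop]
      simp only [PySem.Set.add]
      rw [if_neg (by simpa [PySem.Set.contains] using hfresh)]
    have hstepB : stepB sqr h_ (cols, out) r
        = (colsd.insert r.1 (PySem.Set.add col f), out ++ [(r.1, f)]) := rfl
    rw [hstepA, hstepB]
    apply ih
    · rw [hout]
    · refine (List.nodup_append).mpr ⟨hnd, List.nodup_singleton _, ?_⟩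
      intro p hp q hq
      have hq' : q = (r.1, f) := by simpa using hq
      subst hq'
      exact fun hpq => hfresh (hpq ▸ hp)
    · intro x g
      by_cases hx : x = r.1
      · subst hx
        rw [PySem.Dict.getD_eq_get?_getD, PySem.Dict.get?_insert_self]
        simp only [Option.getD_some]
        rw [PySem.Set.mem_add]
        constructor
        · intro hm
          rcases List.mem_append.mp hm with hm | hm
          · exact Or.inl ((hview g).mp hm)
          · rw [List.mem_singleton] at hm; exact Or.inr (congrArg Prod.snd hm)
        · rintro (hm | rfl)
          · exact List.mem_append.mpr (Or.inl ((hview g).mpr hm))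
          · exact List.mem_append.mpr (Or.inr (by simp))
      · rw [PySem.Dict.getD_eq_get?_getD, PySem.Dict.get?_insert_of_ne _ _ hx,
            ← PySem.Dict.getD_eq_get?_getD, hsd, ← hcol x g]
        constructor
        · intro hm
          rcases List.mem_append.mp hm with hm | hm
          · exact hm
          · simp at hm; exact absurd hm.1 hx
        · exact fun hm => List.mem_append.mpr (Or.inl hm)

-- ===== VERDICT (by name: the statement is the Claim_ definition above) =====
theorem tilt_n_spec : Claim_equal_tilt_n := by
  intro rnd sqr h_ _
  unfold Spec_tilt_n tilt_n tilt_n_alt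
  have h := tilt_loop_inv sqr h_ rnd PySem.Set.empty PySem.Dict.empty []
    rfl List.nodup_nil
    (by intro x f; simp [PySem.Set.empty, PySem.Dict.getD_empty])
  rw [h.1]
  exact (PySem.Set.ofList_eq_self_of_nodup _ h.2).symm
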